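-- pv_equiv track=rewrite | github.com/CarlosUrteaga/socratic-agent | source-code-demo/aggregate_results.py | pick_excerpts
-- ===== SOURCE A (Python) =====
-- def pick_excerpts(rows, max_len=240):
--     """Return 2–3 short, readable snippets that evidence the interaction."""
--     out = []
--     # first ASK/EXPLORE
--     for r in rows:
--         if (r.get("act") or "").upper() == "ASK":
--             out.append(("ELICIT (ASK/EXPLORE)", r.get("text","")))
--             break
--     # first VERIFY with snippets
--     for r in rows:
--         if (r.get("act") or "").upper() == "VERIFY" and "Top passages" in (r.get("text","")):
--             out.append(("RETRIEVE (VERIFY)", r.get("text","")))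
--             break
--     # first SUMMARIZE (feedback/quiz)
--     for r in rows:
--         if (r.get("act") or "").upper() == "SUMMARIZE":
--             out.append(("REVIEW+QUIZ (SUMMARIZE)", r.get("text","")))
--             break
--
--     # trim
--     trimmed = []
--     for label, txt in out:
--         t = " ".join(txt.split())
--         if len(t) > max_len:
--             t = t[:max_len].rstrip() + "…"
--         trimmed.append((label, t))
--     return trimmed
-- ===== SOURCE B (Python) =====
-- def pick_excerpts(rows, max_len=240):
--     """Single pass over rows maintaining three first-match slots, then emit in fixed order."""
--     ask = ver = summ = None
--     for r in rows:
--         act = (r.get("act") or "").upper()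
--         txt = r.get("text", "")
--         if ask is None and act == "ASK":
--             ask = txt
--         if ver is None and act == "VERIFY" and "Top passages" in txt:
--             ver = txt
--         if summ is None and act == "SUMMARIZE":
--             summ = txt
--         if ask is not None and ver is not None and summ is not None:
--             break
--
--     def trim(txt):
--         t = " ".join(txt.split())
--         return t[:max_len].rstrip() + "…" if len(t) > max_len else t
--
--     res = []
--     if ask is not None:
--         res.append(("ELICIT (ASK/EXPLORE)", trim(ask)))
--     if ver is not None:
--         res.append(("RETRIEVE (VERIFY)", trim(ver)))
--     if summ is not None:
--         res.append(("REVIEW+QUIZ (SUMMARIZE)", trim(summ)))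
--     return res
-- ===== Notes on version B (the rewrite author's own statement) =====
-- stated objective: alternative
-- what changed: Replaces A's three separate first-match scans over rows (plus a separate trim pass over the collected pairs) with a single traversal maintaining three set-once slots with early exit, emitting the trimmed pairs in the fixed ELICIT/RETRIEVE/REVIEW order afterwards.
import Mathlib
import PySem

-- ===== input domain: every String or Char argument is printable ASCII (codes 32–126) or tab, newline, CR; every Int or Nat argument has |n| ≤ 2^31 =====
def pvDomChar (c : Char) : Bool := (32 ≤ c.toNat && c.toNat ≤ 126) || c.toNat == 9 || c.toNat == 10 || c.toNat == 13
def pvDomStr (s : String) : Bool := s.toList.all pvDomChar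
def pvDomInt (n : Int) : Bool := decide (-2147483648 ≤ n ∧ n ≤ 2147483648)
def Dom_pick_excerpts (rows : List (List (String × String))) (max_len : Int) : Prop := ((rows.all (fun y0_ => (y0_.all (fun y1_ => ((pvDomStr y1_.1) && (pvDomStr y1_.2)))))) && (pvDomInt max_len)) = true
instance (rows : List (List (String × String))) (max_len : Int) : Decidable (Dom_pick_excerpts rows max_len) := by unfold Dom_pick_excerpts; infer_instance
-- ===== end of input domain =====

-- B is a single pass maintaining three first-match slots instead of A's three separate scans; objective: alternative decomposition (same cost class).

-- shared dict-access helpers: r.get("act") / r.get("text","") on an association list (first match)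
def pvGetS (r : List (String × String)) (k : String) : Option String :=
  (r.find? (fun p => p.1 == k)).map (·.2)

-- (r.get("act") or "").upper()  — '' is falsy, but ('' or '').upper() = ''.upper(), same value
def pvAct (r : List (String × String)) : String :=
  PySem.Str.upper ((pvGetS r "act").getD "")

def pvText (r : List (String × String)) : String :=
  (pvGetS r "text").getD ""

-- the trim step (identical code in both Pythons): t = " ".join(txt.split()); if len(t) > max_len: t = t[:max_len].rstrip() + "…"
def pvTrim (max_len : Int) (txt : String) : String :=
  let t := PySem.Str.join " " (PySem.Str.split₀ txt)
  if (PySem.Str.len t : Int) > max_len then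
    PySem.Str.rstrip (PySem.Str.slice t none (some max_len)) ++ "…"
  else t

-- ===== PORT A =====
-- A's three 'for r in rows: if …: append; break' loops are first-match scans ported as List.find?
def pick_excerpts (rows : List (List (String × String))) (max_len : Int) : List (String × String) :=
  let out : List (String × String) := []
  let out := match rows.find? (fun r => pvAct r == "ASK") with
    | some r => out ++ [("ELICIT (ASK/EXPLORE)", pvText r)]
    | none => out
  let out := match rows.find? (fun r => pvAct r == "VERIFY" && PySem.Str.isIn "Top passages" (pvText r)) with
    | some r => out ++ [("RETRIEVE (VERIFY)", pvText r)]
    | none => out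
  let out := match rows.find? (fun r => pvAct r == "SUMMARIZE") with
    | some r => out ++ [("REVIEW+QUIZ (SUMMARIZE)", pvText r)]
    | none => out
  out.map (fun lt => (lt.1, pvTrim max_len lt.2))

-- ===== PORT B =====
-- single pass: three slots, each set only once; early exit when all three are filled
def pvScan : List (List (String × String)) → Option String → Option String → Option String →
    Option String × Option String × Option String
  | [], a, v, s => (a, v, s)
  | r :: rest, a, v, s =>
    let act := pvAct r
    let txt := pvText r
    let a := if a.isNone && act == "ASK" then some txt else a
    let v := if v.isNone && act == "VERIFY" && PySem.Str.isIn "Top passages" txt then some txt else v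
    let s := if s.isNone && act == "SUMMARIZE" then some txt else s
    if a.isSome && v.isSome && s.isSome then (a, v, s) else pvScan rest a v s

def pick_excerpts_alt (rows : List (List (String × String))) (max_len : Int) : List (String × String) :=
  let (a, v, s) := pvScan rows none none none
  (match a with | some t => [("ELICIT (ASK/EXPLORE)", pvTrim max_len t)] | none => []) ++
  (match v with | some t => [("RETRIEVE (VERIFY)", pvTrim max_len t)] | none => []) ++
  (match s with | some t => [("REVIEW+QUIZ (SUMMARIZE)", pvTrim max_len t)] | none => [])

-- ===== PRECONDITION & SPEC =====
def Spec_pick_excerpts (rows : List (List (String × String))) (max_len : Int) (out : List (String × String)) : Prop := out = pick_excerpts_alt rows max_len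
instance (rows : List (List (String × String))) (max_len : Int) (out : List (String × String)) : Decidable (Spec_pick_excerpts rows max_len out) := by unfold Spec_pick_excerpts; infer_instance

-- ===== CLAIM (what is proved, stated in full; the proofs are below) =====
def Claim_equal_pick_excerpts : Prop := ∀ (rows : List (List (String × String))) (max_len : Int), Dom_pick_excerpts rows max_len → Spec_pick_excerpts rows max_len (pick_excerpts rows max_len)

-- ===== LEMMAS AND PROOFS =====

-- the scan computes, for each still-empty slot, the first match of that slot's predicate
theorem pvScan_eq (rows : List (List (String × String))) (a v s : Option String) :
    pvScan rows a v s =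
      ((a.or ((rows.find? (fun r => pvAct r == "ASK")).map pvText)),
       (v.or ((rows.find? (fun r => pvAct r == "VERIFY" && PySem.Str.isIn "Top passages" (pvText r))).map pvText)),
       (s.or ((rows.find? (fun r => pvAct r == "SUMMARIZE")).map pvText))) := by
  induction rows generalizing a v s with
  | nil => simp [pvScan]
  | cons r rest ih =>
    by_cases h1 : pvAct r == "ASK" <;>
    by_cases h2 : pvAct r == "VERIFY" <;>
    by_cases h2b : PySem.Str.isIn "Top passages" (pvText r) = true <;>
    by_cases h3 : pvAct r == "SUMMARIZE" <;>
    rcases a with _ | ta <;> rcases v with _ | tv <;> rcases s with _ | ts <;>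
      simp_all [pvScan, Option.or]

-- ===== VERDICT (by name: the statement is the Claim_ definition above) =====
theorem pick_excerpts_spec : Claim_equal_pick_excerpts := by
  intro rows max_len _
  unfold Spec_pick_excerpts pick_excerpts pick_excerpts_alt
  rw [pvScan_eq]
  rcases hA : rows.find? (fun r => pvAct r == "ASK") with _ | rA <;>
  rcases hV : rows.find? (fun r => pvAct r == "VERIFY" && PySem.Str.isIn "Top passages" (pvText r)) with _ | rV <;>
  rcases hS : rows.find? (fun r => pvAct r == "SUMMARIZE") with _ | rS <;>
    simp [Option.or]
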